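-- pv_equiv track=rewrite | github.com/lsh23/algorithm-exercise | 투포인터/겹치는건싫어.py | solve
-- ===== SOURCE A (Python) =====
-- from typing import List
--
-- def solve(n: int, k:int, sequence: List[int]) -> int:
--     p_1: int = 0
--     p_2: int = 0
--
--     cnts: List = [0]*100001
--     answer: int = 1
--
--     while p_1 <= p_2 and p_2 < n:
--         if cnts[sequence[p_2]] != k:
--             cnts[sequence[p_2]] += 1
--             p_2 += 1
--         else:
--             cnts[sequence[p_1]]-=1
--             p_1 += 1
--         answer = max(answer, p_2-p_1)
--
--     return answer
-- ===== SOURCE B (Python) =====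
-- from typing import List
-- from collections import defaultdict
--
-- def solve(n: int, k: int, sequence: List[int]) -> int:
--     # One pass with a jumping left pointer: for each value keep the list of its
--     # occurrence indices; when the newest occurrence makes k+1 of them inside the
--     # window, jump left just past the (k+1)-th-last occurrence.
--     positions = defaultdict(list)
--     left = 0
--     answer = 1
--     for right in range(n):
--         v = sequence[right]
--         positions[v].append(right)
--         if len(positions[v]) > k:
--             left = max(left, positions[v][-k - 1] + 1)
--         answer = max(answer, right - left + 1)
--     return answer
-- ===== Notes on version B (the rewrite author's own statement) =====
-- stated objective: alternative
-- what changed: Replaces A's step-by-step two-pointer loop over a preallocated 100001-slot count array (left pointer advanced one cell at a time, decrementing counts) by a single for-pass that keeps, per value, the list of its occurrence indices and jumps the left pointer directly past the (k+1)-th-last occurrence when a value exceeds k in the window.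
-- outside the precondition, e.g. on solve(3, -1, [1, 2, 3]): A returns 3, B returns 1; on solve(2, 1, [100000, -1]): A returns 1, B returns 2; on solve(3, 1, [1, 2]): A raises IndexError, B raises IndexError
import Mathlib
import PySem

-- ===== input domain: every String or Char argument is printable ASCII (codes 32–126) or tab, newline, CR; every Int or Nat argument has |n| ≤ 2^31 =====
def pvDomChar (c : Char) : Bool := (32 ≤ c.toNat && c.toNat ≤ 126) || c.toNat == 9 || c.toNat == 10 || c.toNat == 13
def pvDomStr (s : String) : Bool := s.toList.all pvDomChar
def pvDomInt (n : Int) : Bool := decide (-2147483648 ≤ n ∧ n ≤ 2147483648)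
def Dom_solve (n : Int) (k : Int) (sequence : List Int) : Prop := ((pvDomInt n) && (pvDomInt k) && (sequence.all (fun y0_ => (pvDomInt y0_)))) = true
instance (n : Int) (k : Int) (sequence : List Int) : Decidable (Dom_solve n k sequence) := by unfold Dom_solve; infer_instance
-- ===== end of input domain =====

-- B replaces A's cell-by-cell two-pointer walk over a 100001-slot count array by one
-- pass that stores each value's occurrence indices and jumps the left pointer directly;
-- objective: alternative (same asymptotic cost, different data structure).


-- ===== PORT A =====
-- A's `cnts = [0]*100001` is a fixed table indexed by the element value; it is modeled
-- as a total map keyed by the value itself, exact for elements 0..100000 (Pre_solve).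
-- The while loop runs on fuel: every iteration increases p1+p2 by one and keeps
-- p1 ≤ p2 < n, so it makes at most 2n iterations and fuel (2n+2).toNat never runs out.
def loopA (seq : List Int) (n k : Int) : Nat → Int → Int → (Int → Int) → Int → Int
  | 0, _, _, _, ans => ans
  | fuel+1, p1, p2, cnts, ans =>
    if p1 ≤ p2 ∧ p2 < n then
      if cnts ((PySem.List.pyGet? seq p2).getD 0) ≠ k then
        loopA seq n k fuel p1 (p2+1)
          (fun x => if x = (PySem.List.pyGet? seq p2).getD 0 then cnts x + 1 else cnts x)
          (max ans (p2+1-p1))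
      else
        loopA seq n k fuel (p1+1) p2
          (fun x => if x = (PySem.List.pyGet? seq p1).getD 0 then cnts x - 1 else cnts x)
          (max ans (p2-(p1+1)))
    else ans

def solve (n : Int) (k : Int) (sequence : List Int) : Int :=
  loopA sequence n k (2*n+2).toNat 0 0 (fun _ => 0) 1

-- ===== PORT B =====
-- one step of B's for-loop: state = (positions, left, answer)
def stepB (sequence : List Int) (k : Int)
    (st : PySem.Dict Int (List Int) × Int × Int) (right : Int) :
    PySem.Dict Int (List Int) × Int × Int :=
  let v := (PySem.List.pyGet? sequence right).getD 0
  let ps := st.1.getD v [] ++ [right]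
  let positions := st.1.insert v ps
  let left := if (ps.length : Int) > k then
      max st.2.1 ((PySem.List.pyGet? ps (-k-1)).getD 0 + 1) else st.2.1
  let answer := max st.2.2 (right - left + 1)
  (positions, left, answer)

def solve_alt (n : Int) (k : Int) (sequence : List Int) : Int :=
  ((PySem.List.pyRange 0 n 1).foldl (stepB sequence k)
    (PySem.Dict.empty, 0, 1)).2.2

-- ===== PRECONDITION & SPEC =====
-- Pre_solve excludes: k < 0 (outside the source problem's domain k ≥ 1; A's `!= k` test
-- then never shrinks and it returns max(1,n) while B's negative indexing raises for
-- k ≤ -2); n > len(sequence) (IndexError in both); and first-n elements outside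
-- 0..100000 (above, A raises IndexError; below, A's negative list indexing wraps around
-- and can alias the counter of value v-100001, an artefact of the fixed 100001-slot table).
def Pre_solve (n : Int) (k : Int) (sequence : List Int) : Prop :=
  0 ≤ k ∧ n ≤ (sequence.length : Int) ∧
    ∀ v ∈ sequence.take n.toNat, 0 ≤ v ∧ v ≤ 100000
instance (n : Int) (k : Int) (sequence : List Int) : Decidable (Pre_solve n k sequence) := by
  unfold Pre_solve; infer_instance

def pvWitness_solve : Int × Int × List Int := (3, 1, [1, 2, 1])

def Spec_solve (n : Int) (k : Int) (sequence : List Int) (out : Int) : Prop := out = solve_alt n k sequence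
instance (n : Int) (k : Int) (sequence : List Int) (out : Int) : Decidable (Spec_solve n k sequence out) := by unfold Spec_solve; infer_instance

-- ===== CLAIM (what is proved, stated in full; the proofs are below) =====
def Claim_equal_solve : Prop := ∀ (n : Int) (k : Int) (sequence : List Int), Dom_solve n k sequence → Pre_solve n k sequence → Spec_solve n k sequence (solve n k sequence)

-- ===== LEMMAS AND PROOFS =====

-- occL g v r = indices i < r with g i = v, in increasing order
def occL (g : Nat → Int) (v : Int) (r : Nat) : List Nat :=
  (List.range r).filter (fun i => decide (g i = v))

-- cnt g v l r = number of occurrences of v at indices in [l, r)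
def cnt (g : Nat → Int) (v : Int) (l r : Nat) : Nat :=
  (occL g v r).countP (fun i => decide (l ≤ i))

-- reference left pointer: A's shrink loop, as a function
def shrinkL (g : Nat → Int) (K r l : Nat) : Nat :=
  if l < r ∧ cnt g (g r) l r = K then shrinkL g K r (l+1) else l
termination_by r - l
decreasing_by omega

-- reference main loop: process rights r..m-1 with current left l and answer ans
def refGo (g : Nat → Int) (K m r l : Nat) (ans : Int) : Int :=
  if r < m then
    refGo g K m (r+1) (shrinkL g K r l)
      (max ans ((r : Int) + 1 - (shrinkL g K r l : Int)))
  else ans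
termination_by m - r
decreasing_by omega


-- element lookup used by both ports (sequence[i] for a Nat index in range)
def G (seq : List Int) (i : Nat) : Int := (seq[i]?).getD 0

theorem occL_succ (g : Nat → Int) (v : Int) (r : Nat) :
    occL g v (r+1) = occL g v r ++ if g r = v then [r] else [] := by
  simp [occL, List.range_succ, List.filter_append]
  split_ifs with h <;> simp [h]

theorem mem_occL {g : Nat → Int} {v : Int} {r i : Nat} :
    i ∈ occL g v r ↔ i < r ∧ g i = v := by
  simp [occL, List.mem_filter]

theorem pairwise_occL (g : Nat → Int) (v : Int) (r : Nat) :
    (occL g v r).Pairwise (· < ·) :=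
  (List.pairwise_lt_range).filter _

theorem nodup_occL (g : Nat → Int) (v : Int) (r : Nat) : (occL g v r).Nodup :=
  (pairwise_occL g v r).imp (fun h => Nat.ne_of_lt h)

theorem countP_le_shift (xs : List Nat) (hnd : xs.Nodup) (l : Nat) :
    xs.countP (fun i => decide (l ≤ i))
      = xs.countP (fun i => decide (l+1 ≤ i)) + (if l ∈ xs then 1 else 0) := by
  induction xs with
  | nil => simp
  | cons x xs ih =>
    rcases List.nodup_cons.mp hnd with ⟨hx, hnd'⟩
    by_cases hxl : x = l
    · subst hxl
      simp [List.countP_cons, ih hnd', hx]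
    · have : (l ∈ x :: xs) ↔ (l ∈ xs) := by
        simp [List.mem_cons, fun h : l = x => hxl h.symm, Ne.symm hxl]
      rw [List.countP_cons, List.countP_cons, ih hnd']
      by_cases hlx : l ≤ x
      · have : l + 1 ≤ x := by omega
        simp [hlx, this, List.mem_cons, Ne.symm hxl]
        omega
      · have : ¬ (l + 1 ≤ x) := by omega
        simp [hlx, this, List.mem_cons, Ne.symm hxl]

theorem cnt_succ_right (g : Nat → Int) (v : Int) {l r : Nat} (h : l ≤ r) :
    cnt g v l (r+1) = cnt g v l r + (if g r = v then 1 else 0) := by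
  rw [cnt, occL_succ, List.countP_append]
  split_ifs with hv <;> simp [cnt, h]

theorem cnt_succ_left (g : Nat → Int) (v : Int) {l r : Nat} (h : l < r) :
    cnt g v l r = cnt g v (l+1) r + (if g l = v then 1 else 0) := by
  rw [cnt, cnt, countP_le_shift _ (nodup_occL g v r) l]
  by_cases hv : g l = v
  · rw [if_pos (mem_occL.mpr ⟨h, hv⟩), if_pos hv]
  · rw [if_neg (fun hm => hv (mem_occL.mp hm).2), if_neg hv]

theorem cnt_mono (g : Nat → Int) (v : Int) {l l' : Nat} (r : Nat) (h : l ≤ l') :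
    cnt g v l' r ≤ cnt g v l r := by
  apply List.countP_mono_left
  intro i _ hi
  simp only [decide_eq_true_eq] at *
  omega

theorem cnt_rr (g : Nat → Int) (v : Int) (r : Nat) : cnt g v r r = 0 := by
  rw [cnt, List.countP_eq_zero]
  intro i hi
  rcases mem_occL.mp hi with ⟨h1, _⟩
  simp; omega

theorem cnt_pos_exists {g : Nat → Int} {v : Int} {l r : Nat} (h : 0 < cnt g v l r) :
    ∃ i, l ≤ i ∧ i < r ∧ g i = v := by
  rcases List.countP_pos_iff.mp h with ⟨i, hmem, hdec⟩
  rcases mem_occL.mp hmem with ⟨h1, h2⟩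
  exact ⟨i, by simpa using hdec, h1, h2⟩

theorem sorted_countP_lt (xs : List Nat) (hp : xs.Pairwise (· < ·)) :
    ∀ (i : Nat), i < xs.length → xs.countP (fun x => decide (x < xs.getD i 0)) = i := by
  induction xs with
  | nil => intro i h; simp at h
  | cons x xs ih =>
    rcases List.pairwise_cons.mp hp with ⟨hx, hp'⟩
    intro i h
    cases i with
    | zero =>
      simp only [List.getD_cons_zero, List.countP_cons]
      rw [List.countP_eq_zero.mpr]
      · simp
      · intro y hy; simpa using Nat.le_of_lt (hx y hy)
    | succ i =>
      have hlen : i < xs.length := by simpa using h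
      have hmem : xs.getD i 0 ∈ xs := by
        rw [List.getD_eq_getElem xs 0 hlen]; exact List.getElem_mem hlen
      have hxt : decide (x < xs.getD i 0) = true := decide_eq_true (hx _ hmem)
      simp only [List.getD_cons_succ, List.countP_cons, hxt, if_true]
      rw [ih hp' i hlen]

theorem sorted_countP_ge (xs : List Nat) (hp : xs.Pairwise (· < ·))
    (i : Nat) (h : i < xs.length) :
    xs.countP (fun x => decide (xs.getD i 0 ≤ x)) = xs.length - i := by
  have hsplit := List.length_eq_countP_add_countP (l := xs) (p := fun x => decide (x < xs.getD i 0))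
  have hcong : xs.countP (fun a => decide ¬(decide (a < xs.getD i 0) = true)) = xs.countP (fun x => decide (xs.getD i 0 ≤ x)) := by
    apply List.countP_congr
    intro y _
    simp [Nat.not_lt]
  rw [sorted_countP_lt xs hp i h, hcong] at hsplit
  omega


theorem cnt_le_len (g : Nat → Int) (v : Int) (l r : Nat) :
    cnt g v l r ≤ (occL g v r).length := List.countP_le_length

theorem q_mem (g : Nat → Int) (v : Int) (r K : Nat) (hK : 1 ≤ K)
    (hc : K ≤ (occL g v r).length) :
    (occL g v r).getD ((occL g v r).length - K) 0 ∈ occL g v r := by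
  have h : (occL g v r).length - K < (occL g v r).length := by omega
  rw [List.getD_eq_getElem _ 0 h]
  exact List.getElem_mem h

theorem cnt_at_q (g : Nat → Int) (v : Int) (r K : Nat) (hK : 1 ≤ K)
    (hc : K ≤ (occL g v r).length) :
    cnt g v ((occL g v r).getD ((occL g v r).length - K) 0) r = K := by
  have h : (occL g v r).length - K < (occL g v r).length := by omega
  have := sorted_countP_ge (occL g v r) (pairwise_occL g v r) _ h
  rw [cnt]
  rw [this]  -- cnt = countP (q ≤ ·)
  omega

theorem cnt_at_q_succ (g : Nat → Int) (v : Int) (r K : Nat) (hK : 1 ≤ K)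
    (hc : K ≤ (occL g v r).length) :
    cnt g v ((occL g v r).getD ((occL g v r).length - K) 0 + 1) r = K - 1 := by
  have hq := cnt_at_q g v r K hK hc
  have hmem := q_mem g v r K hK hc
  have hshift := countP_le_shift (occL g v r) (nodup_occL g v r)
    ((occL g v r).getD ((occL g v r).length - K) 0)
  rw [if_pos hmem] at hshift
  rw [cnt] at hq ⊢
  omega

theorem q_lt_of_cnt_lt (g : Nat → Int) (v : Int) {l r K : Nat} (hK : 1 ≤ K)
    (hc : K ≤ (occL g v r).length) (hlt : cnt g v l r < K) :
    (occL g v r).getD ((occL g v r).length - K) 0 < l := by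
  by_contra hle
  push Not at hle
  have := cnt_mono g v r hle
  rw [cnt_at_q g v r K hK hc] at this
  omega

theorem le_q_of_cnt_eq (g : Nat → Int) (v : Int) {l r K : Nat} (hK : 1 ≤ K)
    (hc : K ≤ (occL g v r).length) (heq : cnt g v l r = K) :
    l ≤ (occL g v r).getD ((occL g v r).length - K) 0 := by
  by_contra hlt
  push Not at hlt
  have hmono : cnt g v l r ≤ cnt g v ((occL g v r).getD ((occL g v r).length - K) 0 + 1) r :=
    cnt_mono g v r (by omega)
  rw [cnt_at_q_succ g v r K hK hc] at hmono
  omega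

theorem shrinkL_stop {g : Nat → Int} {K r l : Nat}
    (h : ¬(l < r ∧ cnt g (g r) l r = K)) : shrinkL g K r l = l := by
  rw [shrinkL, if_neg h]

theorem shrinkL_step {g : Nat → Int} {K r l : Nat}
    (h1 : l < r) (h2 : cnt g (g r) l r = K) :
    shrinkL g K r l = shrinkL g K r (l+1) := by
  conv_lhs => rw [shrinkL]
  rw [if_pos ⟨h1, h2⟩]

theorem shrinkL_jump (g : Nat → Int) (r K : Nat) (hK : 1 ≤ K)
    (hc : K ≤ (occL g (g r) r).length) :
    ∀ (d l : Nat), (occL g (g r) r).getD ((occL g (g r) r).length - K) 0 - l ≤ d →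
      l ≤ (occL g (g r) r).getD ((occL g (g r) r).length - K) 0 →
      cnt g (g r) l r = K →
      shrinkL g K r l = (occL g (g r) r).getD ((occL g (g r) r).length - K) 0 + 1 := by
  have hqmem := q_mem g (g r) r K hK hc
  rcases mem_occL.mp hqmem with ⟨hqr, _⟩
  intro d
  induction d with
  | zero =>
    intro l hd hlq hcnt
    have hlq' : l = (occL g (g r) r).getD ((occL g (g r) r).length - K) 0 := by omega
    subst hlq'
    rw [shrinkL_step hqr hcnt, shrinkL_stop]
    rintro ⟨_, hbad⟩
    rw [cnt_at_q_succ g (g r) r K hK hc] at hbad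
    omega
  | succ d ih =>
    intro l hd hlq hcnt
    by_cases hl : l = (occL g (g r) r).getD ((occL g (g r) r).length - K) 0
    · subst hl
      rw [shrinkL_step hqr hcnt, shrinkL_stop]
      rintro ⟨_, hbad⟩
      rw [cnt_at_q_succ g (g r) r K hK hc] at hbad
      omega
    · have hlq2 : l < (occL g (g r) r).getD ((occL g (g r) r).length - K) 0 := by omega
      have hlr : l < r := by omega
      have hgl : ¬ g l = g r := by
        intro hgl
        have hcl := cnt_succ_left g (g r) hlr
        rw [if_pos hgl] at hcl
        have hmono : cnt g (g r) ((occL g (g r) r).getD ((occL g (g r) r).length - K) 0) r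
            ≤ cnt g (g r) (l+1) r := cnt_mono g (g r) r (by omega)
        rw [cnt_at_q g (g r) r K hK hc] at hmono
        omega
      have hcl := cnt_succ_left g (g r) hlr
      rw [if_neg hgl] at hcl
      rw [shrinkL_step hlr hcnt]
      exact ih (l+1) (by omega) (by omega) (by omega)

theorem shrinkL_closed (g : Nat → Int) {K r l : Nat} (hK : 1 ≤ K) (hlr : l ≤ r)
    (hw : cnt g (g r) l r ≤ K) :
    shrinkL g K r l =
      if K ≤ (occL g (g r) r).length then
        max l ((occL g (g r) r).getD ((occL g (g r) r).length - K) 0 + 1)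
      else l := by
  split_ifs with hc
  · rcases Nat.lt_or_ge (cnt g (g r) l r) K with hlt | hge
    · rw [shrinkL_stop (by rintro ⟨_, h2⟩; omega)]
      have := q_lt_of_cnt_lt g (g r) hK hc hlt
      omega
    · have heq : cnt g (g r) l r = K := by omega
      have hlq := le_q_of_cnt_eq g (g r) hK hc heq
      rw [shrinkL_jump g r K hK hc _ l (le_refl _) hlq heq]
      omega
  · have : cnt g (g r) l r < K := by
      have := cnt_le_len g (g r) l r
      omega
    rw [shrinkL_stop (by rintro ⟨_, h2⟩; omega)]

theorem shrinkL_bounds (g : Nat → Int) (K r : Nat) :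
    ∀ (d l : Nat), r - l ≤ d → l ≤ r → l ≤ shrinkL g K r l ∧ shrinkL g K r l ≤ r := by
  intro d
  induction d with
  | zero =>
    intro l hd hlr
    have : l = r := by omega
    subst this
    rw [shrinkL_stop (by rintro ⟨h1, _⟩; omega)]
    omega
  | succ d ih =>
    intro l hd hlr
    by_cases h : l < r ∧ cnt g (g r) l r = K
    · rw [shrinkL_step h.1 h.2]
      have := ih (l+1) (by omega) (by omega)
      omega
    · rw [shrinkL_stop h]
      omega

theorem cnt_shrinkL_lt (g : Nat → Int) (K r : Nat) (hK : 1 ≤ K) :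
    ∀ (d l : Nat), r - l ≤ d → l ≤ r → cnt g (g r) l r ≤ K →
      cnt g (g r) (shrinkL g K r l) r < K := by
  intro d
  induction d with
  | zero =>
    intro l hd hlr hw
    have : l = r := by omega
    subst this
    rw [shrinkL_stop (by rintro ⟨h1, _⟩; omega), cnt_rr]
    omega
  | succ d ih =>
    intro l hd hlr hw
    by_cases h : l < r ∧ cnt g (g r) l r = K
    · rw [shrinkL_step h.1 h.2]
      exact ih (l+1) (by omega) (by omega)
        (le_trans (cnt_mono g (g r) r (by omega)) hw)
    · rw [shrinkL_stop h]
      rcases Nat.lt_or_ge l r with h1 | h1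
      · rcases Nat.lt_or_ge (cnt g (g r) l r) K with h2 | h2
        · exact h2
        · exact absurd ⟨h1, by omega⟩ h
      · have : l = r := by omega
        subst this
        rw [cnt_rr]
        omega

theorem inv_preserve (g : Nat → Int) (K r l : Nat) (hK : 1 ≤ K) (hlr : l ≤ r)
    (hw : ∀ v, cnt g v l r ≤ K) :
    ∀ v, cnt g v (shrinkL g K r l) (r+1) ≤ K := by
  intro v
  have hb := shrinkL_bounds g K r (r - l) l (le_refl _) hlr
  rw [cnt_succ_right g v hb.2]
  by_cases hv : g r = v
  · subst hv
    have := cnt_shrinkL_lt g K r hK (r - l) l (le_refl _) hlr (hw (g r))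
    simp
    omega
  · rw [if_neg hv]
    have := cnt_mono g v r hb.1
    have := hw v
    omega


theorem loopA_eq (seq : List Int) (n k : Int) (hn0 : 0 ≤ n)
    (hnl : n ≤ (seq.length : Int)) (hk : 1 ≤ k) :
    ∀ (fuel : Nat) (l r : Nat) (ans : Int), l ≤ r → r ≤ n.toNat →
      (∀ v, cnt (G seq) v l r ≤ k.toNat) → (r : Int) - (l : Int) ≤ ans →
      2 * n.toNat - l - r < fuel →
      loopA seq n k fuel (l : Int) (r : Int) (fun x => (cnt (G seq) x l r : Int)) ans
        = refGo (G seq) k.toNat n.toNat r l ans := by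
  have hkK : (k.toNat : Int) = k := by omega
  have hK1 : 1 ≤ k.toNat := by omega
  intro fuel
  induction fuel with
  | zero => intro l r ans _ _ _ _ hf; exact absurd hf (Nat.not_lt_zero _)
  | succ fuel ih =>
    intro l r ans hlr hrm hw hans hf
    by_cases hr : r < n.toNat
    · have hrlen : r < seq.length := by omega
      have hget2 : (PySem.List.pyGet? seq ((r : Nat) : Int)).getD 0 = G seq r := by
        rw [PySem.List.pyGet?_natCast]; rfl
      simp only [loopA]
      rw [if_pos ⟨(by exact_mod_cast hlr : ((l:Nat):Int) ≤ ((r:Nat):Int)), (by omega : ((r:Nat):Int) < n)⟩]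
      rw [hget2]
      by_cases hc : cnt (G seq) (G seq r) l r = k.toNat
      · -- shrink branch
        have hceq : (cnt (G seq) (G seq r) l r : Int) = k := by rw [hc, hkK]
        rw [if_neg (not_not_intro hceq)]
        have hlr' : l < r := by
          rcases cnt_pos_exists (g := G seq) (v := G seq r) (l := l) (r := r) (by omega) with ⟨i, h1, h2, _⟩
          omega
        have hget1 : (PySem.List.pyGet? seq ((l : Nat) : Int)).getD 0 = G seq l := by
          rw [PySem.List.pyGet?_natCast]; rfl
        rw [hget1]
        have hfun : (fun x => if x = G seq l then (cnt (G seq) x l r : Int) - 1 else (cnt (G seq) x l r : Int))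
            = (fun x => (cnt (G seq) x (l+1) r : Int)) := by
          funext x
          have hcl := cnt_succ_left (G seq) x hlr'
          by_cases hx : x = G seq l
          · rw [if_pos hx]
            rw [if_pos hx.symm] at hcl
            omega
          · rw [if_neg hx]
            rw [if_neg (fun h => hx h.symm)] at hcl
            omega
        have hansr : max ans (((r:Nat):Int) - (((l:Nat):Int) + 1)) = ans :=
          max_eq_left (by omega)
        have hcast : ((l:Nat):Int) + 1 = (((l+1 : Nat)):Int) := by push_cast; ring
        rw [hfun, hansr, hcast]
        rw [ih (l+1) r ans (by omega) hrm
          (fun v => le_trans (cnt_mono (G seq) v r (by omega)) (hw v)) (by omega) (by omega)]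
        have hss : shrinkL (G seq) k.toNat r l = shrinkL (G seq) k.toNat r (l+1) :=
          shrinkL_step hlr' hc
        conv_lhs => rw [refGo]
        conv_rhs => rw [refGo]
        rw [if_pos hr, if_pos hr, hss]
      · -- expand branch
        have hcne : (cnt (G seq) (G seq r) l r : Int) ≠ k := by
          intro h; apply hc; omega
        rw [if_pos hcne]
        have hfun : (fun x => if x = G seq r then (cnt (G seq) x l r : Int) + 1 else (cnt (G seq) x l r : Int))
            = (fun x => (cnt (G seq) x l (r+1) : Int)) := by
          funext x
          have hcr := cnt_succ_right (G seq) x hlr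
          by_cases hx : x = G seq r
          · rw [if_pos hx]
            rw [if_pos hx.symm] at hcr
            omega
          · rw [if_neg hx]
            rw [if_neg (fun h => hx h.symm)] at hcr
            omega
        have hcast : ((r:Nat):Int) + 1 = (((r+1 : Nat)):Int) := by push_cast; ring
        rw [hfun, hcast]
        have hwin : ∀ v, cnt (G seq) v l (r+1) ≤ k.toNat := by
          intro v
          have hcr := cnt_succ_right (G seq) v hlr
          by_cases hx : G seq r = v
          · rw [if_pos hx] at hcr
            have := hw v
            have hlt : cnt (G seq) v l r < k.toNat := by
              rcases Nat.lt_or_ge (cnt (G seq) v l r) k.toNat with h1 | h1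
              · exact h1
              · exfalso; apply hc; rw [hx]; omega
            omega
          · rw [if_neg hx] at hcr
            have := hw v
            omega
        rw [ih l (r+1) (max ans ((((r+1 : Nat)):Int) - ((l:Nat):Int))) (by omega) (by omega)
          hwin (le_max_right _ _) (by omega)]
        conv_rhs => rw [refGo]
        rw [if_pos hr, shrinkL_stop (by rintro ⟨_, h2⟩; exact hc h2), hcast]
    · -- loop exits: r = n.toNat
      simp only [loopA]
      rw [if_neg (by rintro ⟨_, h2⟩; omega)]
      conv_rhs => rw [refGo]
      rw [if_neg hr]


theorem left_step (seq : List Int) (k : Int) (l r : Nat) (hk : 1 ≤ k)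
    (hlr : l ≤ r) (hw : cnt (G seq) (G seq r) l r ≤ k.toNat) :
    (if ((((occL (G seq) (G seq r) (r+1)).map (fun i : Nat => (i : Int))).length : Int) > k) then
      max ((l:Nat):Int)
        ((PySem.List.pyGet? ((occL (G seq) (G seq r) (r+1)).map (fun i : Nat => (i : Int))) (-k-1)).getD 0 + 1)
    else ((l:Nat):Int))
      = ((shrinkL (G seq) k.toNat r l : Nat) : Int) := by
  have hK1 : 1 ≤ k.toNat := by omega
  have hkK : (k.toNat : Int) = k := by omega
  have hocc : occL (G seq) (G seq r) (r+1) = occL (G seq) (G seq r) r ++ [r] := by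
    rw [occL_succ, if_pos rfl]
  have hlen : ((occL (G seq) (G seq r) (r+1)).map (fun i : Nat => (i : Int))).length
      = (occL (G seq) (G seq r) r).length + 1 := by
    rw [hocc]; simp
  rw [shrinkL_closed (G seq) hK1 hlr hw]
  by_cases hc : k.toNat ≤ (occL (G seq) (G seq r) r).length
  · rw [if_pos (by rw [hlen]; omega), if_pos hc]
    have hneg : -k-1 = -(((k.toNat+1 : Nat)):Int) := by push_cast; omega
    rw [hneg, PySem.List.pyGet?_neg_natCast _ (k.toNat+1) (by omega) (by rw [hlen]; omega)]
    rw [hlen]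
    have hidx : (occL (G seq) (G seq r) r).length + 1 - (k.toNat + 1)
        = (occL (G seq) (G seq r) r).length - k.toNat := by omega
    rw [hidx]
    have hq : (occL (G seq) (G seq r) r).length - k.toNat < (occL (G seq) (G seq r) r).length := by
      omega
    have hget : ((occL (G seq) (G seq r) (r+1)).map (fun i : Nat => (i : Int)))[(occL (G seq) (G seq r) r).length - k.toNat]?
        = some (((occL (G seq) (G seq r) r).getD ((occL (G seq) (G seq r) r).length - k.toNat) 0 : Nat) : Int) := by
      rw [hocc, List.getElem?_map, List.getElem?_append_left hq,
        List.getElem?_eq_getElem hq, List.getD_eq_getElem _ 0 hq]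
      rfl
    rw [hget]
    simp only [Option.getD_some]
    push_cast [Nat.cast_max]
    ring
  · rw [if_neg (by rw [hlen]; omega), if_neg hc]

theorem foldB_eq (seq : List Int) (n k : Int) (hn0 : 0 ≤ n)
    (hnl : n ≤ (seq.length : Int)) (hk : 1 ≤ k) :
    ∀ (d r l : Nat) (ans : Int) (positions : PySem.Dict Int (List Int)),
      n.toNat - r ≤ d → r ≤ n.toNat → l ≤ r →
      (∀ v, cnt (G seq) v l r ≤ k.toNat) →
      (∀ v, positions.getD v [] = (occL (G seq) v r).map (fun i : Nat => (i : Int))) →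
      ((PySem.List.pyRange ((r:Nat):Int) n 1).foldl (stepB seq k) (positions, ((l:Nat):Int), ans)).2.2
        = refGo (G seq) k.toNat n.toNat r l ans := by
  have hK1 : 1 ≤ k.toNat := by omega
  intro d
  induction d with
  | zero =>
    intro r l ans positions hd hrm hlr hw hpos
    have hr : r = n.toNat := by omega
    rw [PySem.List.pyRange_one_eq_nil (by omega), List.foldl_nil]
    conv_rhs => rw [refGo]
    rw [if_neg (by omega)]
  | succ d ih =>
    intro r l ans positions hd hrm hlr hw hpos
    by_cases hr : r < n.toNat
    · rw [PySem.List.pyRange_one_cons (by omega : ((r:Nat):Int) < n), List.foldl_cons]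
      have hget : (PySem.List.pyGet? seq ((r : Nat) : Int)).getD 0 = G seq r := by
        rw [PySem.List.pyGet?_natCast]; rfl
      have hps : positions.getD (G seq r) [] ++ [((r:Nat):Int)]
          = (occL (G seq) (G seq r) (r+1)).map (fun i : Nat => (i : Int)) := by
        rw [hpos (G seq r), occL_succ, if_pos rfl, List.map_append]
        rfl
      simp only [stepB]
      rw [hget, hps, left_step seq k l r hk hlr (hw (G seq r))]
      have hposinv : ∀ v, ((positions.insert (G seq r)
            ((occL (G seq) (G seq r) (r+1)).map (fun i : Nat => (i : Int)))).getD v [])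
          = (occL (G seq) v (r+1)).map (fun i : Nat => (i : Int)) := by
        intro v
        rw [PySem.Dict.getD_insert]
        by_cases hv : v = G seq r
        · rw [if_pos hv, hv]
        · rw [if_neg hv, hpos v, occL_succ, if_neg (fun h => hv h.symm), List.append_nil]
      have hbounds := shrinkL_bounds (G seq) k.toNat r (r - l) l (le_refl _) hlr
      have hcast : ((r:Nat):Int) + 1 = (((r+1 : Nat)):Int) := by push_cast; ring
      have hanseq : max ans (((r:Nat):Int) - ((shrinkL (G seq) k.toNat r l : Nat):Int) + 1)
          = max ans ((((r:Nat)):Int) + 1 - ((shrinkL (G seq) k.toNat r l : Nat):Int)) := by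
        have : ((r:Nat):Int) - ((shrinkL (G seq) k.toNat r l : Nat):Int) + 1
            = (((r:Nat)):Int) + 1 - ((shrinkL (G seq) k.toNat r l : Nat):Int) := by omega
        rw [this]
      rw [hanseq, hcast]
      rw [ih (r+1) (shrinkL (G seq) k.toNat r l)
        (max ans ((((r+1:Nat)):Int) - ((shrinkL (G seq) k.toNat r l : Nat):Int)))
        (positions.insert (G seq r) ((occL (G seq) (G seq r) (r+1)).map (fun i : Nat => (i : Int))))
        (by omega) (by omega) (by omega)
        (inv_preserve (G seq) k.toNat r l hK1 hlr hw) hposinv]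
      conv_rhs => rw [refGo]
      rw [if_pos hr, hcast]
    · have hr' : r = n.toNat := by omega
      rw [PySem.List.pyRange_one_eq_nil (by omega), List.foldl_nil]
      conv_rhs => rw [refGo]
      rw [if_neg hr]


theorem cnt_nil (g : Nat → Int) (v : Int) (l : Nat) : cnt g v l 0 = 0 := by
  simp [cnt, occL]

theorem solveA_nonpos (seq : List Int) (n k : Int) (hn : n ≤ 0) : solve n k seq = 1 := by
  unfold solve
  cases h : (2*n+2).toNat with
  | zero => rfl
  | succ f =>
    simp only [loopA]
    rw [if_neg (by rintro ⟨_, h2⟩; omega)]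

theorem solveA_k0 (seq : List Int) (n : Int) (hn : 0 < n) : solve n 0 seq = 1 := by
  unfold solve
  obtain ⟨f, hf⟩ : ∃ f, (2*n+2).toNat = f + 2 := ⟨(2*n).toNat, by omega⟩
  rw [hf]
  simp only [loopA]
  rw [if_pos ⟨le_refl (0:Int), hn⟩, if_neg (by simp)]
  rw [if_neg (by rintro ⟨h1, _⟩; omega)]
  norm_num

theorem foldB_k0 (seq : List Int) :
    ∀ (L : List Int) (positions : PySem.Dict Int (List Int)) (l ans : Int), 0 ≤ ans →
      (L.foldl (stepB seq 0) (positions, l, ans)).2.2 = ans := by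
  intro L
  induction L with
  | nil => intro positions l ans _; rfl
  | cons x L ih =>
    intro positions l ans hans
    rw [List.foldl_cons]
    simp only [stepB]
    rw [if_pos (by simp : ((((positions.getD ((PySem.List.pyGet? seq x).getD 0) [] ++ [x]).length) : Int) > 0))]
    have hneg : (-(0:Int)-1) = -1 := by norm_num
    rw [hneg, PySem.List.pyGet?_neg_one_append_singleton]
    simp only [Option.getD_some]
    have hans' : max ans (x - max l (x + 1) + 1) = ans := by
      have := le_max_right l (x+1)
      exact max_eq_left (by omega)
    rw [hans']
    exact ih _ _ _ hans

theorem solveB_k0 (seq : List Int) (n : Int) : solve_alt n 0 seq = 1 := by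
  unfold solve_alt
  rw [foldB_k0 seq _ _ _ _ (by norm_num)]

-- ===== VERDICT (by name: the statement is the Claim_ definition above) =====
theorem solve_spec : Claim_equal_solve := by
  intro n k seq _ hpre
  obtain ⟨hk0, hnl, _⟩ := hpre
  unfold Spec_solve
  by_cases hn : n ≤ 0
  · rw [solveA_nonpos seq n k hn]
    unfold solve_alt
    rw [PySem.List.pyRange_one_eq_nil hn, List.foldl_nil]
  · have hn' : 0 < n := by omega
    by_cases hkz : k = 0
    · subst hkz
      rw [solveA_k0 seq n hn', solveB_k0 seq n]
    · have hk1 : 1 ≤ k := by omega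
      have hA := loopA_eq seq n k (by omega) hnl hk1 ((2*n+2).toNat) 0 0 1
        (le_refl 0) (by omega) (by intro v; rw [cnt_nil]; omega) (by norm_num) (by omega)
      have hB := foldB_eq seq n k (by omega) hnl hk1 n.toNat 0 0 1 PySem.Dict.empty
        (by omega) (by omega) (le_refl 0) (by intro v; rw [cnt_nil]; omega)
        (by intro v; rw [PySem.Dict.getD_empty]; simp [occL])
      have hfz : (fun x => ((cnt (G seq) x 0 0 : Nat) : Int)) = (fun _ => (0:Int)) := by
        funext x; rw [cnt_nil]; rfl
      rw [hfz] at hA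
      simp only [Nat.cast_zero] at hA hB
      unfold solve solve_alt
      rw [hA, ← hB]
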